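-- pv_equiv track=rewrite | github.com/jsd784/testmerge | src/houserobber.py | houseRob
-- ===== SOURCE A (Python) =====
-- def houseRob(A):
--
--     amt1 = amt2 = 0
--
--     for i in range(len(A)):
--         if i % 2 == 0:
--             amt1 = amt1 + A[i]
--         else:
--             amt2 = amt2 + A[i]
--
--     return max(amt1,amt2)
-- ===== SOURCE B (Python) =====
-- def houseRob(A):
--     e = o = 0
--     for x in reversed(A):
--         e, o = x + o, e
--     return max(e, o)
-- ===== Notes on version B (the rewrite author's own statement) =====
-- stated objective: simpler
-- what changed: Replaces the indexed loop that dispatches each A[i] on i%2 into one of two accumulators with a branch-free backward pass that swaps the two accumulators at every element; no index variable, indexing or parity test remains, which also removes per-iteration range/index/modulo overhead.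
import Mathlib
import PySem

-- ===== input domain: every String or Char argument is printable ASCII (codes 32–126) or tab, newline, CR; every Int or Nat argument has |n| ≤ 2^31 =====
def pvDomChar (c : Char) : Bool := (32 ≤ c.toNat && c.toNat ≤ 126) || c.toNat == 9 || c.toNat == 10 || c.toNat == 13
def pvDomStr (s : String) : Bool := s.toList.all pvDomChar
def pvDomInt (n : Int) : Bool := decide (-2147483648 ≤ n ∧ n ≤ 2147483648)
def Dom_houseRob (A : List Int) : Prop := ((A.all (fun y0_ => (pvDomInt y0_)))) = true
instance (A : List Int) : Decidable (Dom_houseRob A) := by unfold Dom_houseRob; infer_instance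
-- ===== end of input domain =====

-- B replaces A's indexed i%2-dispatch loop with a branch-free backward pass that swaps two accumulators (objective: simpler).

-- ===== PORT A =====
def houseRob (A : List Int) : Int :=
  let p := (PySem.List.pyRange 0 (A.length : Int) 1).foldl
    (fun (q : Int × Int) i =>
      if PySem.Int.mod i 2 = 0 then (q.1 + PySem.List.pyGetD A i 0, q.2)
      else (q.1, q.2 + PySem.List.pyGetD A i 0)) (0, 0)
  max p.1 p.2

-- ===== PORT B =====
def houseRob_alt (A : List Int) : Int :=
  let p := A.reverse.foldl (fun (q : Int × Int) x => (x + q.2, q.1)) (0, 0)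
  max p.1 p.2

-- ===== PRECONDITION & SPEC =====
def Spec_houseRob (A : List Int) (out : Int) : Prop := out = houseRob_alt A
instance (A : List Int) (out : Int) : Decidable (Spec_houseRob A out) := by unfold Spec_houseRob; infer_instance

-- ===== CLAIM (what is proved, stated in full; the proofs are below) =====
def Claim_equal_houseRob : Prop := ∀ (A : List Int), Dom_houseRob A → Spec_houseRob A (houseRob A)

-- ===== LEMMAS AND PROOFS =====

/-- The (even-index sum, odd-index sum) pair, structurally. -/
def eosum : List Int → Int × Int
  | [] => (0, 0)
  | x :: xs => (x + (eosum xs).2, (eosum xs).1)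

lemma alt_fold_eq_eosum (A : List Int) :
    A.reverse.foldl (fun (q : Int × Int) x => (x + q.2, q.1)) (0, 0) = eosum A := by
  induction A with
  | nil => rfl
  | cons x xs ih =>
    simp [List.reverse_cons, List.foldl_append, ih, eosum]

lemma genA (xs : List Int) : ∀ (k : Nat) (a b : Int),
    (List.range xs.length).foldl
      (fun (q : Int × Int) j =>
        if (k + j) % 2 = 0 then (q.1 + xs.getD j 0, q.2) else (q.1, q.2 + xs.getD j 0)) (a, b)
    = if k % 2 = 0 then (a + (eosum xs).1, b + (eosum xs).2)
      else (a + (eosum xs).2, b + (eosum xs).1) := by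
  induction xs with
  | nil =>
    intro k a b
    simp [eosum]
  | cons x l ih =>
    intro k a b
    rw [List.length_cons, List.range_succ_eq_map, List.foldl_cons, List.foldl_map]
    have hstep :
        (fun (q : Int × Int) (j : Nat) =>
          if (k + (j + 1)) % 2 = 0 then (q.1 + (x :: l).getD (j + 1) 0, q.2)
          else (q.1, q.2 + (x :: l).getD (j + 1) 0))
        = (fun (q : Int × Int) (j : Nat) =>
          if ((k + 1) + j) % 2 = 0 then (q.1 + l.getD j 0, q.2)
          else (q.1, q.2 + l.getD j 0)) := by
      funext q j
      have : (k + (j + 1)) % 2 = ((k + 1) + j) % 2 := by omega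
      simp [this, List.getD]
    simp only [Nat.succ_eq_add_one, hstep]
    by_cases hk : k % 2 = 0
    · have hk1 : ¬ (k + 1) % 2 = 0 := by omega
      have h0 : (k + 0) % 2 = 0 := by omega
      rw [if_pos h0, ih (k + 1)]
      rw [if_neg hk1, if_pos hk]
      simp [eosum, List.getD]
      ring
    · have hk1 : (k + 1) % 2 = 0 := by omega
      have h0 : ¬ (k + 0) % 2 = 0 := by omega
      rw [if_neg h0, ih (k + 1)]
      rw [if_pos hk1, if_neg hk]
      simp [eosum, List.getD]
      ring

lemma houseRob_fold_eq_eosum (A : List Int) :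
    (PySem.List.pyRange 0 (A.length : Int) 1).foldl
      (fun (q : Int × Int) i =>
        if PySem.Int.mod i 2 = 0 then (q.1 + PySem.List.pyGetD A i 0, q.2)
        else (q.1, q.2 + PySem.List.pyGetD A i 0)) (0, 0) = eosum A := by
  rw [PySem.List.pyRange_zero_natCast, List.foldl_map]
  have hf :
      (fun (q : Int × Int) (j : Nat) =>
        if PySem.Int.mod (j : Int) 2 = 0 then (q.1 + PySem.List.pyGetD A (j : Int) 0, q.2)
        else (q.1, q.2 + PySem.List.pyGetD A (j : Int) 0))
      = (fun (q : Int × Int) (j : Nat) =>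
        if (0 + j) % 2 = 0 then (q.1 + A.getD j 0, q.2) else (q.1, q.2 + A.getD j 0)) := by
    funext q j
    have hm : PySem.Int.mod (j : Int) 2 = ((j % 2 : Nat) : Int) := by
      exact_mod_cast PySem.Int.mod_natCast j 2
    have hc : (PySem.Int.mod (j : Int) 2 = 0) ↔ ((0 + j) % 2 = 0) := by
      rw [hm]; omega
    simp only [PySem.List.pyGetD_natCast]
    by_cases h : (0 + j) % 2 = 0
    · rw [if_pos (hc.mpr h), if_pos h]
    · rw [if_neg (fun hh => h (hc.mp hh)), if_neg h]
  rw [hf, genA A 0 0 0]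
  simp

-- ===== VERDICT (by name: the statement is the Claim_ definition above) =====
theorem houseRob_spec : Claim_equal_houseRob := by
  intro A _
  unfold Spec_houseRob houseRob houseRob_alt
  rw [houseRob_fold_eq_eosum, alt_fold_eq_eosum]
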